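-- pv_equiv track=rewrite | github.com/tony/datapackage-pipelines | datapackage_pipelines/specs/resolver.py | convert_dot_notation
-- ===== SOURCE A (Python) =====
-- def convert_dot_notation(executor):
--     parts = []
--     back_up = False
--     while executor.startswith('..'):
--         parts.append('..')
--         executor = executor[1:]
--         back_up = True
--
--     if executor.startswith('.'):
--         executor = executor[1:]
--
--     executor = executor.split('.')
--     executor[-1] += '.py'
--
--     parts.extend(executor)
--
--     return back_up, parts
-- ===== SOURCE B (Python) =====
-- def convert_dot_notation(executor):
--     k = len(executor) - len(executor.lstrip('.'))
--     back_up = k >= 2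
--     parts = ['..'] * (k - 1)
--     rest = executor[k:].split('.')
--     rest[-1] += '.py'
--     return back_up, parts + rest
-- ===== Notes on version B (the rewrite author's own statement) =====
-- stated objective: simpler
-- what changed: Replaces A's character-by-character while-loop that strips one leading dot per iteration (appending '..' each time and toggling a flag) with a single up-front count of leading dots, from which the backup flag (k >= 2), the ['..']*(k-1) prefix and the remainder executor[k:] are computed directly.
import Mathlib
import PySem

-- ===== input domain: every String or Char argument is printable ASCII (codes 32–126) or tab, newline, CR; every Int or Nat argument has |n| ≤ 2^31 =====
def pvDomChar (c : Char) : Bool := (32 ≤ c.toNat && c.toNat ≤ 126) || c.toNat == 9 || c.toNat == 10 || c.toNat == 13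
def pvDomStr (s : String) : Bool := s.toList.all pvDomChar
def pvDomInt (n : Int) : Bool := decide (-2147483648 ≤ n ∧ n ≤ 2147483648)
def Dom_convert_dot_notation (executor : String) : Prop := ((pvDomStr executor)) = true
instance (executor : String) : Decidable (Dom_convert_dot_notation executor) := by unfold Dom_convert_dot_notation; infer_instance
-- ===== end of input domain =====

-- B replaces A's dot-stripping while-loop with a single leading-dot count and list
-- multiplication (objective: simpler).


-- ===== PORT A =====
-- the while-loop: while executor.startswith('..'): parts.append('..'); executor = executor[1:]; back_up = True
def pyDotLoop (cs : List Char) (parts : List String) (backUp : Bool) : List String × Bool × List Char :=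
  if h : PySem.Chars.startswith cs ['.', '.'] then
    pyDotLoop (PySem.List.slice cs (some 1) none) (parts ++ [".."]) true
  else (parts, backUp, cs)
termination_by cs.length
decreasing_by
  rw [PySem.List.slice_from_one]
  obtain ⟨t, ht⟩ := (PySem.Chars.startswith_iff _ _).1 h
  rw [← ht]
  simp

def convert_dot_notation (executor : String) : Bool × List String :=
  let r := pyDotLoop executor.toList [] false
  let parts := r.1
  let backUp := r.2.1
  let cs := r.2.2
  -- if executor.startswith('.'): executor = executor[1:]
  let cs2 := if PySem.Chars.startswith cs ['.'] then PySem.List.slice cs (some 1) none else cs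
  -- executor = executor.split('.'); executor[-1] += '.py'   (split('.') is never empty)
  let pieces := PySem.Chars.splitOn cs2 ['.']
  let pieces2 := pieces.dropLast ++ [(pieces.getLast?.getD []) ++ ['.', 'p', 'y']]
  (backUp, parts ++ pieces2.map String.ofList)

-- ===== PORT B =====
def convert_dot_notation_alt (executor : String) : Bool × List String :=
  let cs := executor.toList
  -- k = len(executor) - len(executor.lstrip('.')) : hand port, exact — lstrip('.') removes
  -- exactly the maximal run of leading '.', so k is the length of that run
  let k := (cs.takeWhile (· == '.')).length
  let backUp := decide (2 ≤ k)
  -- parts = ['..'] * (k - 1)  (Python's negative multiplier at k = 0 gives [], like Nat sub)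
  let parts := List.replicate (k - 1) ".."
  -- rest = executor[k:].split('.'); rest[-1] += '.py'
  let rest := PySem.Chars.splitOn (cs.drop k) ['.']
  let rest2 := rest.dropLast ++ [(rest.getLast?.getD []) ++ ['.', 'p', 'y']]
  (backUp, parts ++ rest2.map String.ofList)

-- ===== PRECONDITION & SPEC =====
def Spec_convert_dot_notation (executor : String) (out : Bool × List String) : Prop := out = convert_dot_notation_alt executor
instance (executor : String) (out : Bool × List String) : Decidable (Spec_convert_dot_notation executor out) := by unfold Spec_convert_dot_notation; infer_instance

-- ===== CLAIM (what is proved, stated in full; the proofs are below) =====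
def Claim_equal_convert_dot_notation : Prop := ∀ (executor : String), Dom_convert_dot_notation executor → Spec_convert_dot_notation executor (convert_dot_notation executor)

-- ===== LEMMAS AND PROOFS =====

-- shape of a list w.r.t. its maximal leading run of dots
theorem dot_decomp (cs : List Char) :
    cs = List.replicate ((cs.takeWhile (· == '.')).length) '.' ++
           cs.drop ((cs.takeWhile (· == '.')).length) ∧
    (∀ c t, cs.drop ((cs.takeWhile (· == '.')).length) = c :: t → c ≠ '.') := by
  induction cs with
  | nil => simp
  | cons c t ih =>
    by_cases hc : c = '.'
    · subst hc
      refine ⟨?_, ?_⟩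
      · simpa [List.replicate] using ih.1
      · simpa [List.takeWhile_cons] using ih.2
    · refine ⟨by simp [hc], ?_⟩
      intro c' t' h
      simp only [List.takeWhile_cons, beq_iff_eq, if_neg hc, List.length_nil,
        List.drop_zero, List.cons.injEq] at h
      intro heq
      exact hc (h.1 ▸ heq)

theorem pyDotLoop_eq_aux (n : Nat) : ∀ (cs : List Char), cs.length ≤ n → ∀ (p : List String) (b : Bool),
    pyDotLoop cs p b =
      (p ++ List.replicate ((cs.takeWhile (· == '.')).length - 1) "..",
       b || decide (2 ≤ (cs.takeWhile (· == '.')).length),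
       cs.drop ((cs.takeWhile (· == '.')).length - 1)) := by
  induction n with
  | zero =>
    intro cs hlen p b
    have : cs = [] := List.eq_nil_of_length_eq_zero (Nat.le_zero.1 hlen)
    subst this
    rw [pyDotLoop, dif_neg (by decide)]
    simp
  | succ n ih =>
    intro cs hlen p b
    by_cases h : PySem.Chars.startswith cs ['.', '.'] = true
    · obtain ⟨t, ht⟩ := (PySem.Chars.startswith_iff _ _).1 h
      subst ht
      rw [pyDotLoop, dif_pos h, PySem.List.slice_from_one]
      have hlen' : ('.' :: t).length ≤ n := by simp at hlen ⊢; omega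
      rw [show (['.', '.'] ++ t).tail = '.' :: t from rfl, ih _ hlen']
      simp only [List.takeWhile_cons, beq_self_eq_true, List.cons_append,
        List.nil_append, if_true]
      simp [List.replicate_succ]
    · rw [pyDotLoop, dif_neg h]
      have hk : (cs.takeWhile (· == '.')).length ≤ 1 := by
        by_contra hgt
        have hgt : 2 ≤ (cs.takeWhile (· == '.')).length := by omega
        match cs, hgt with
        | c1 :: c2 :: t, hgt =>
          by_cases h1 : c1 = '.'
          · subst h1
            by_cases hc2 : c2 = '.'
            · subst hc2
              exact h ((PySem.Chars.startswith_iff _ _).2 ⟨t, rfl⟩)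
            · simp [hc2] at hgt
          · simp [h1] at hgt
        | [c], hgt => by_cases h1 : c = '.' <;> simp [h1] at hgt
      have h1 : ((cs.takeWhile (· == '.')).length - 1) = 0 := by omega
      have hb : decide (2 ≤ (cs.takeWhile (· == '.')).length) = false := by
        simp; omega
      simp [h1, hb]

theorem pyDotLoop_eq (cs : List Char) (p : List String) (b : Bool) :
    pyDotLoop cs p b =
      (p ++ List.replicate ((cs.takeWhile (· == '.')).length - 1) "..",
       b || decide (2 ≤ (cs.takeWhile (· == '.')).length),
       cs.drop ((cs.takeWhile (· == '.')).length - 1)) :=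
  pyDotLoop_eq_aux cs.length cs le_rfl p b

-- the one extra '.' strip after the loop lands exactly at drop k
theorem strip_after_loop (cs : List Char) :
    (if PySem.Chars.startswith (cs.drop ((cs.takeWhile (· == '.')).length - 1)) ['.']
       then PySem.List.slice (cs.drop ((cs.takeWhile (· == '.')).length - 1)) (some 1) none
       else cs.drop ((cs.takeWhile (· == '.')).length - 1))
      = cs.drop ((cs.takeWhile (· == '.')).length) := by
  obtain ⟨hshape, hhead⟩ := dot_decomp cs
  set k := (cs.takeWhile (· == '.')).length with hk
  rcases Nat.eq_zero_or_pos k with h0 | hpos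
  · -- k = 0: no leading dot, the branch is not taken
    rw [h0]
    simp only [Nat.zero_sub]
    have hns : PySem.Chars.startswith (cs.drop 0) ['.'] = false := by
      rw [List.drop_zero]
      cases hcs : cs with
      | nil => decide
      | cons c t =>
        apply Bool.not_eq_true _ |>.mp
        intro hs
        obtain ⟨u, hu⟩ := (PySem.Chars.startswith_iff _ _).1 hs
        have hc : c = '.' := by
          have := hu
          simp at this
          exact this.1.symm
        have := hhead c t (by rw [h0]; simpa using hcs)
        exact this hc
    rw [hns]
    simp
  · -- k ≥ 1: drop (k-1) cs = '.' :: drop k cs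
    have hdrop : cs.drop (k - 1) = '.' :: cs.drop k := by
      conv_lhs => rw [hshape]
      rw [List.drop_append_of_le_length (by simpa using Nat.sub_le k 1)]
      rw [List.drop_replicate]
      have : k - (k - 1) = 1 := by omega
      rw [this]
      simp
    rw [hdrop]
    have hs : PySem.Chars.startswith ('.' :: cs.drop k) ['.'] = true :=
      (PySem.Chars.startswith_iff _ _).2 ⟨cs.drop k, rfl⟩
    rw [hs]
    simp [PySem.List.slice_from_one]

-- ===== VERDICT (by name: the statement is the Claim_ definition above) =====
theorem convert_dot_notation_spec : Claim_equal_convert_dot_notation := by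
  intro executor _
  unfold Spec_convert_dot_notation convert_dot_notation convert_dot_notation_alt
  rw [pyDotLoop_eq]
  simp only [strip_after_loop]
  simp
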